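-- pv_equiv track=rewrite | github.com/altunbulakemre75/nizam-agent-c2 | cop/sync.py | _vclock_dominates
-- ===== SOURCE A (Python) =====
-- from typing import Any, Deque, Dict, List, Optional, Tuple
--
-- def _vclock_dominates(a: Dict[str, int], b: Dict[str, int]) -> bool:
--     """
--     Return True if vector clock *a* dominates *b* (a ≥ b for all entries,
--     a > b for at least one).
--     """
--     all_keys = set(a.keys()) | set(b.keys())
--     at_least_one_greater = False
--     for k in all_keys:
--         va = a.get(k, 0)
--         vb = b.get(k, 0)
--         if va < vb:
--             return False
--         if va > vb:
--             at_least_one_greater = True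
--     return at_least_one_greater
-- ===== SOURCE B (Python) =====
-- def _vclock_dominates(a, b):
--     ka, kb = sorted(a), sorted(b)
--     i = j = 0
--     strict = False
--     while i < len(ka) or j < len(kb):
--         if j == len(kb) or (i < len(ka) and ka[i] < kb[j]):
--             k = ka[i]; i += 1
--         elif i == len(ka) or kb[j] < ka[i]:
--             k = kb[j]; j += 1
--         else:
--             k = ka[i]; i += 1; j += 1
--         va, vb = a.get(k, 0), b.get(k, 0)
--         if va < vb:
--             return False
--         if va > vb:
--             strict = True
--     return strict
-- ===== Notes on version B (the rewrite author's own statement) =====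
-- stated objective: alternative
-- what changed: Replaces A's hash-set key-union loop by sorting both key lists and doing a two-pointer ordered merge over them, maintaining the same strictness flag during the single merge pass.
import Mathlib
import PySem

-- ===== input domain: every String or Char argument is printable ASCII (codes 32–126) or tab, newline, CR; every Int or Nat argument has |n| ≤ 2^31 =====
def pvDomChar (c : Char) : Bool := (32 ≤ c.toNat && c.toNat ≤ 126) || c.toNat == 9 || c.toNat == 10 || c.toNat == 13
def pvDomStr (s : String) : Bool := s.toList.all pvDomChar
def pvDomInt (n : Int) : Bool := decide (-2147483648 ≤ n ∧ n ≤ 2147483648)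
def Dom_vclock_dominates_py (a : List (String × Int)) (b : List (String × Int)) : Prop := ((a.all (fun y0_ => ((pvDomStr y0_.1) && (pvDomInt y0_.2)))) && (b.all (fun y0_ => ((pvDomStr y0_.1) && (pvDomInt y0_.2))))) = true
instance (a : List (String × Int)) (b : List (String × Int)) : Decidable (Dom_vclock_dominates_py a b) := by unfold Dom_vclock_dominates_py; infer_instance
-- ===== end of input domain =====

-- B replaces A's hash-set key-union loop by sorting both key lists and merging them
-- with two pointers in one pass (same strictness flag) — an alternative algorithm.


-- ===== PORT A =====
-- A's loop over the key-set union, with the early 'return False' and the flag.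
def vclockLoopA (da db : PySem.Dict String Int) : List String → Bool → Bool
  | [], flag => flag
  | k :: ks, flag =>
    let va := da.getD k 0
    let vb := db.getD k 0
    if va < vb then false
    else vclockLoopA da db ks (flag || decide (va > vb))

def vclock_dominates_py (a : List (String × Int)) (b : List (String × Int)) : Bool :=
  let da := PySem.Dict.mk a
  let db := PySem.Dict.mk b
  let allKeys := PySem.Set.union (PySem.Set.ofList da.keys) (PySem.Set.ofList db.keys)
  vclockLoopA da db allKeys false

-- ===== PORT B =====
-- Source B's while loop: two pointers over the two sorted key lists, transcribed as a
-- recursion consuming the suffixes ka, kb that the indices i, j point to.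
def vclockMergeB (da db : PySem.Dict String Int) : List String → List String → Bool → Bool
  | [], [], strict => strict
  | x :: ka, [], strict =>
    let va := da.getD x 0
    let vb := db.getD x 0
    if va < vb then false
    else vclockMergeB da db ka [] (strict || decide (va > vb))
  | [], y :: kb, strict =>
    let va := da.getD y 0
    let vb := db.getD y 0
    if va < vb then false
    else vclockMergeB da db [] kb (strict || decide (va > vb))
  | x :: ka, y :: kb, strict =>
    if x < y then
      let va := da.getD x 0
      let vb := db.getD x 0
      if va < vb then false
      else vclockMergeB da db ka (y :: kb) (strict || decide (va > vb))
    else if y < x then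
      let va := da.getD y 0
      let vb := db.getD y 0
      if va < vb then false
      else vclockMergeB da db (x :: ka) kb (strict || decide (va > vb))
    else
      let va := da.getD x 0
      let vb := db.getD x 0
      if va < vb then false
      else vclockMergeB da db ka kb (strict || decide (va > vb))
  termination_by ka kb _ => ka.length + kb.length

def vclock_dominates_py_alt (a : List (String × Int)) (b : List (String × Int)) : Bool :=
  let da := PySem.Dict.mk a
  let db := PySem.Dict.mk b
  let ka := PySem.List.sorted da.keys (fun k => k) false
  let kb := PySem.List.sorted db.keys (fun k => k) false
  vclockMergeB da db ka kb false

-- ===== PRECONDITION & SPEC =====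
def Spec_vclock_dominates_py (a : List (String × Int)) (b : List (String × Int)) (out : Bool) : Prop := out = vclock_dominates_py_alt a b
instance (a : List (String × Int)) (b : List (String × Int)) (out : Bool) : Decidable (Spec_vclock_dominates_py a b out) := by unfold Spec_vclock_dominates_py; infer_instance

-- ===== CLAIM (what is proved, stated in full; the proofs are below) =====
def Claim_equal_vclock_dominates_py : Prop := ∀ (a : List (String × Int)) (b : List (String × Int)), Dom_vclock_dominates_py a b → Spec_vclock_dominates_py a b (vclock_dominates_py a b)

-- ===== LEMMAS AND PROOFS =====

-- A's loop computes "all keys are ≥, and (flag or some key is >)".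
theorem vclockLoopA_eq (da db : PySem.Dict String Int) (ks : List String) (flag : Bool) :
    vclockLoopA da db ks flag =
      ((ks.all fun k => da.getD k 0 ≥ db.getD k 0) &&
        (flag || ks.any fun k => da.getD k 0 > db.getD k 0)) := by
  induction ks generalizing flag with
  | nil => simp [vclockLoopA]
  | cons k ks ih =>
    simp only [vclockLoopA, List.all_cons, List.any_cons]
    split
    · rename_i h
      have h1 : ¬ (da.getD k 0 ≥ db.getD k 0) := by omega
      simp [h1]
    · rename_i h
      have h1 : da.getD k 0 ≥ db.getD k 0 := by omega
      rw [ih]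
      simp [h1]
      by_cases h2 : da.getD k 0 > db.getD k 0 <;> simp [h2]

-- the merged key sequence B visits (proof helper only)
def mergeKeys : List String → List String → List String
  | ka, [] => ka
  | [], kb => kb
  | x :: ka, y :: kb =>
    if x < y then x :: mergeKeys ka (y :: kb)
    else if y < x then y :: mergeKeys (x :: ka) kb
    else x :: mergeKeys ka kb
  termination_by ka kb => ka.length + kb.length

theorem mergeKeys_nil_right (ka : List String) : mergeKeys ka [] = ka := by
  cases ka <;> simp [mergeKeys]

theorem mergeKeys_nil_left (kb : List String) : mergeKeys [] kb = kb := by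
  cases kb <;> simp [mergeKeys]

theorem mem_mergeKeys (k : String) : ∀ (ka kb : List String),
    (k ∈ mergeKeys ka kb ↔ k ∈ ka ∨ k ∈ kb)
  | ka, [] => by simp [mergeKeys]
  | [], y :: kb => by simp [mergeKeys]
  | x :: ka, y :: kb => by
    simp only [mergeKeys]
    split
    · simp only [List.mem_cons, mem_mergeKeys k ka (y :: kb), List.mem_cons]; tauto
    · split
      · simp only [List.mem_cons, mem_mergeKeys k (x :: ka) kb, List.mem_cons]; tauto
      · rename_i h1 h2
        have hxy : x = y := le_antisymm (not_lt.mp h2) (not_lt.mp h1)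
        simp only [List.mem_cons, mem_mergeKeys k ka kb, hxy]; tauto
  termination_by ka kb => ka.length + kb.length

-- B's merge loop equals A's loop run over the merged key sequence.
theorem vclockMergeB_eq (da db : PySem.Dict String Int) : ∀ (ka kb : List String) (s : Bool),
    vclockMergeB da db ka kb s = vclockLoopA da db (mergeKeys ka kb) s
  | [], [], s => by simp [vclockMergeB, mergeKeys, vclockLoopA]
  | x :: ka, [], s => by
    simp only [vclockMergeB, mergeKeys, vclockLoopA]
    split
    · rfl
    · rw [vclockMergeB_eq da db ka [] _, mergeKeys_nil_right]
  | [], y :: kb, s => by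
    simp only [vclockMergeB, mergeKeys, vclockLoopA]
    split
    · rfl
    · rw [vclockMergeB_eq da db [] kb _, mergeKeys_nil_left]
  | x :: ka, y :: kb, s => by
    simp only [vclockMergeB, mergeKeys]
    split
    · simp only [vclockLoopA]
      split
      · rfl
      · exact vclockMergeB_eq da db ka (y :: kb) _
    · split
      · simp only [vclockLoopA]
        split
        · rfl
        · exact vclockMergeB_eq da db (x :: ka) kb _
      · simp only [vclockLoopA]
        split
        · rfl
        · exact vclockMergeB_eq da db ka kb _
  termination_by ka kb _ => ka.length + kb.length

-- all/any over two membership-equivalent key lists agree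
theorem all_any_of_mem_iff (p q : String → Bool) (l1 l2 : List String)
    (h : ∀ k, k ∈ l1 ↔ k ∈ l2) :
    (l1.all p = l2.all p) ∧ (l1.any q = l2.any q) := by
  constructor
  · rw [Bool.eq_iff_iff]
    simp only [List.all_eq_true]
    exact ⟨fun hh k hk => hh k ((h k).mpr hk), fun hh k hk => hh k ((h k).mp hk)⟩
  · rw [Bool.eq_iff_iff]
    simp only [List.any_eq_true]
    exact ⟨fun ⟨k, hk, hq⟩ => ⟨k, (h k).mp hk, hq⟩, fun ⟨k, hk, hq⟩ => ⟨k, (h k).mpr hk, hq⟩⟩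

-- ===== VERDICT (by name: the statement is the Claim_ definition above) =====
theorem vclock_dominates_py_spec : Claim_equal_vclock_dominates_py := by
  intro a b _
  unfold Spec_vclock_dominates_py vclock_dominates_py vclock_dominates_py_alt
  simp only [vclockMergeB_eq, vclockLoopA_eq]
  set da := PySem.Dict.mk a
  set db := PySem.Dict.mk b
  have hmem : ∀ k, k ∈ PySem.Set.union (PySem.Set.ofList da.keys) (PySem.Set.ofList db.keys) ↔
      k ∈ mergeKeys (PySem.List.sorted da.keys (fun k => k) false) (PySem.List.sorted db.keys (fun k => k) false) := by
    intro k
    simp [mem_mergeKeys, PySem.Set.mem_union, PySem.List.mem_sorted, PySem.Set.mem_ofList]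
  obtain ⟨h1, h2⟩ := all_any_of_mem_iff (fun k => decide (da.getD k 0 ≥ db.getD k 0))
    (fun k => decide (da.getD k 0 > db.getD k 0)) _ _ hmem
  rw [h1, h2]
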